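-- pv_equiv track=rewrite | github.com/pol-perez/mtg-collection-checklist | mtg-collection-checklist.py | process_card_data
-- ===== SOURCE A (Python) =====
-- def process_card_data(card_list, set_list, url_list):
--     # Use zip to merge the lists, and zip* to unmerge after sorting
--     card_list, set_list, url_list = zip(
--         *sorted(list(zip(card_list, set_list, url_list))))
--
--     # Get unique art for each card by removing duplicates with same artist
--     unique_card_list = list(dict.fromkeys(card_list))
--
--     # Get index of first instance of each unique card
--     index_list = []
--     for card in unique_card_list:
--         index = card_list.index(card)
--         index_list.append(index)
--
--     # Get sets of each unique card by slicing the set list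
--     unique_set_list = []
--     unique_url_list = []
--     for i in range(len(index_list)):
--         # Check if not final iteration
--         if i != len(index_list)-1:
--             set_ = set_list[index_list[i]:index_list[i+1]]
--         else:
--             set_ = set_list[index_list[i]:]
--
--         unique_set_list.append(set_)
--
--         # Get one URL for each unique card
--         single_url = 'https://scryfall.com' + url_list[index_list[i]]
--         unique_url_list.append(single_url)
--
--     # Generate final card list
--     output_list = []
--     for i in range(len(unique_card_list)):
--         data = (
--             unique_card_list[i][0], unique_card_list[i][1], unique_set_list[i], unique_url_list[i])
--         output_list.append(data)
--
--     return output_list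
-- ===== SOURCE B (Python) =====
-- def process_card_data(card_list, set_list, url_list):
--     # One pass over the sorted merged triples, grouping contiguous runs of
--     # equal cards and collecting each group's sets and first URL directly.
--     triples = sorted(zip(card_list, set_list, url_list))
--     output_list = []
--     i, n = 0, len(triples)
--     while i < n:
--         card = triples[i][0]
--         j = i
--         sets = []
--         while j < n and triples[j][0] == card:
--             sets.append(triples[j][1])
--             j += 1
--         output_list.append(
--             (card[0], card[1], tuple(sets),
--              'https://scryfall.com' + triples[i][2]))
--         i = j
--     return output_list
-- ===== Notes on version B (the rewrite author's own statement) =====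
-- stated objective: alternative
-- what changed: Instead of A's dict-dedup followed by a repeated card_list.index scan per unique card and index-based slicing, B makes a single pass over the same sorted merged triples, grouping contiguous runs of equal cards and collecting each group's sets and first URL on the fly.
-- outside the precondition, e.g. on process_card_data([], [], []): A raises ValueError, B returns []; on process_card_data([('a', 'x')], [], ['u']): A raises ValueError, B returns []
-- crash fix: When any of the three argument lists is empty, A raises ValueError (the zip(*sorted(...)) unpacking gets no triples), while B returns the empty list. — e.g. on process_card_data([], [], []): A raises ValueError, B returns []
import Mathlib
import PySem

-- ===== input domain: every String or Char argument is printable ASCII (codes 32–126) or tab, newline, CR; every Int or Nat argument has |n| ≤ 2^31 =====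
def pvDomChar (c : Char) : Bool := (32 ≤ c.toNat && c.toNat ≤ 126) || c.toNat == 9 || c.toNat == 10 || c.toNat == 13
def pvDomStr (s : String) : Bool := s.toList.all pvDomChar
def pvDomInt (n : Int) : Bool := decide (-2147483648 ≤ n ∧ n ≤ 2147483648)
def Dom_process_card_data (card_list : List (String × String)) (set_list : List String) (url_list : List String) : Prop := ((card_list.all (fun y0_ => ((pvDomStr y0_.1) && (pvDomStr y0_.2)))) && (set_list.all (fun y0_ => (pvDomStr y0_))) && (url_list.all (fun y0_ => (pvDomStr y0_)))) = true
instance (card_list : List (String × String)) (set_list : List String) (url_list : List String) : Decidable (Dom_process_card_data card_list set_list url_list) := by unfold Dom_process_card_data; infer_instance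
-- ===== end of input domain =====

-- B replaces A's dedup + repeated list.index + index-slicing pipeline with one grouping
-- pass over the same sorted triple list (same return value; objective: alternative).

-- ===== PORT A =====
-- Python's tuple comparison ((name, artist), set, url) is lexicographic throughout;
-- pvKey names that order (an injective relabelling into Mathlib's Lex products).
def pvKey (t : (String × String) × String × String) :
    Lex ((String ×ₗ String) × (String ×ₗ String)) :=
  toLex (toLex t.1, toLex t.2)

-- the body of A after the zip/sort line (a step-for-step transliteration of A's loops)
def aPipeline (triples : List ((String × String) × String × String)) :
    List (String × String × List String × String) :=
  let card_list := triples.map (fun t => t.1)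
  let set_list := triples.map (fun t => t.2.1)
  let url_list := triples.map (fun t => t.2.2)
  let unique_card_list := PySem.List.dedup card_list
  -- card_list.index(card): index? is always `some` here (card comes from dedup card_list)
  let index_list : List Int := unique_card_list.foldl
    (fun acc card => acc ++ [(((PySem.List.index? card_list card).getD 0 : Nat) : Int)]) []
  let p := (PySem.List.pyRange 0 (PySem.List.len index_list) 1).foldl
    (fun (acc : List (List String) × List String) i =>
      let set_ :=
        if i ≠ PySem.List.len index_list - 1 then
          PySem.List.slice set_list (some (PySem.List.pyGetD index_list i 0))
            (some (PySem.List.pyGetD index_list (i + 1) 0))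
        else
          PySem.List.slice set_list (some (PySem.List.pyGetD index_list i 0)) none
      let single_url := "https://scryfall.com" ++
        PySem.List.pyGetD url_list (PySem.List.pyGetD index_list i 0) ""
      (acc.1 ++ [set_], acc.2 ++ [single_url]))
    ([], [])
  let unique_set_list := p.1
  let unique_url_list := p.2
  (PySem.List.pyRange 0 (PySem.List.len unique_card_list) 1).foldl
    (fun acc i =>
      acc ++ [((PySem.List.pyGetD unique_card_list i ("", "")).1,
               (PySem.List.pyGetD unique_card_list i ("", "")).2,
               PySem.List.pyGetD unique_set_list i [],
               PySem.List.pyGetD unique_url_list i "")]) []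

def process_card_data (card_list : List (String × String)) (set_list : List String) (url_list : List String) : List (String × String × List String × String) :=
  aPipeline (PySem.List.sorted (card_list.zip (set_list.zip url_list)) pvKey)

-- ===== PORT B =====
-- Source B's outer while loop: peel one group of contiguous equal cards per step
-- (structural recursion on a length fuel; the list consumed never grows, so the
-- fuel l.length always suffices — see pv_altGroupF_fuel below)
def altGroupF : Nat → List ((String × String) × String × String) →
    List (String × String × List String × String)
  | _, [] => []
  | 0, _ :: _ => []
  | fuel + 1, t :: rest =>
    (t.1.1, t.1.2,
     t.2.1 :: (rest.takeWhile (fun r => r.1 == t.1)).map (fun r => r.2.1),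
     "https://scryfall.com" ++ t.2.2) ::
      altGroupF fuel (rest.dropWhile (fun r => r.1 == t.1))

def altGroup (l : List ((String × String) × String × String)) :
    List (String × String × List String × String) :=
  altGroupF l.length l

def process_card_data_alt (card_list : List (String × String)) (set_list : List String) (url_list : List String) : List (String × String × List String × String) :=
  altGroup (PySem.List.sorted (card_list.zip (set_list.zip url_list)) pvKey)

-- ===== PRECONDITION & SPEC =====
-- Pre_ excludes inputs where any argument list is empty: there A's `zip(*sorted(...))`
-- unpacking raises ValueError (A returns no value), while B naturally returns [].
def Pre_process_card_data (card_list : List (String × String)) (set_list : List String) (url_list : List String) : Prop :=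
  card_list ≠ [] ∧ set_list ≠ [] ∧ url_list ≠ []
instance (card_list : List (String × String)) (set_list : List String) (url_list : List String) : Decidable (Pre_process_card_data card_list set_list url_list) := by unfold Pre_process_card_data; infer_instance

def pvWitness_process_card_data : (List (String × String)) × List String × List String :=
  ([("Llanowar Elves", "Chippy"), ("Llanowar Elves", "Chippy")], ["M10", "M11"], ["/c/1", "/c/2"])

-- A raises ValueError (zip(*...) unpacking of an empty merged list) whenever one of the
-- three argument lists is empty; B returns the empty output list there.
def Raises_process_card_data (card_list : List (String × String)) (set_list : List String) (url_list : List String) : Prop :=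
  card_list = [] ∨ set_list = [] ∨ url_list = []
instance (card_list : List (String × String)) (set_list : List String) (url_list : List String) : Decidable (Raises_process_card_data card_list set_list url_list) := by unfold Raises_process_card_data; infer_instance
def pvRaiseWitness_process_card_data : (List (String × String)) × List String × List String :=
  ([], [], [])
def pvRaiseWitnessOut_process_card_data : List (String × String × List String × String) := []

def Spec_process_card_data (card_list : List (String × String)) (set_list : List String) (url_list : List String) (out : List (String × String × List String × String)) : Prop := out = process_card_data_alt card_list set_list url_list
instance (card_list : List (String × String)) (set_list : List String) (url_list : List String) (out : List (String × String × List String × String)) : Decidable (Spec_process_card_data card_list set_list url_list out) := by unfold Spec_process_card_data; infer_instance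

-- ===== CLAIM (what is proved, stated in full; the proofs are below) =====
def Claim_equal_process_card_data : Prop := ∀ (card_list : List (String × String)) (set_list : List String) (url_list : List String), Dom_process_card_data card_list set_list url_list → Pre_process_card_data card_list set_list url_list → Spec_process_card_data card_list set_list url_list (process_card_data card_list set_list url_list)

def Claim_raises_process_card_data : Prop := (∀ (card_list : List (String × String)) (set_list : List String) (url_list : List String), Dom_process_card_data card_list set_list url_list → Raises_process_card_data card_list set_list url_list → ¬ Pre_process_card_data card_list set_list url_list) ∧ (Dom_process_card_data (pvRaiseWitness_process_card_data.1) (pvRaiseWitness_process_card_data.2.1) (pvRaiseWitness_process_card_data.2.2) ∧ Raises_process_card_data (pvRaiseWitness_process_card_data.1) (pvRaiseWitness_process_card_data.2.1) (pvRaiseWitness_process_card_data.2.2) ∧ process_card_data_alt (pvRaiseWitness_process_card_data.1) (pvRaiseWitness_process_card_data.2.1) (pvRaiseWitness_process_card_data.2.2) = pvRaiseWitnessOut_process_card_data)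

-- ===== LEMMAS AND PROOFS =====

-- abbreviations for the stages of A's pipeline (proof-only)
def pvUq (L : List ((String × String) × String × String)) : List (String × String) :=
  PySem.List.dedup (L.map (fun t => t.1))
def pvIdx (L : List ((String × String) × String × String)) (x : String × String) : Nat :=
  (PySem.List.index? (L.map (fun t => t.1)) x).getD 0
def pvJ (L : List ((String × String) × String × String)) : List Int :=
  (pvUq L).map (fun x => ((pvIdx L x : Nat) : Int))
def pvSet (L : List ((String × String) × String × String)) (k : Nat) : List String :=
  if (k : Int) ≠ ((pvJ L).length : Int) - 1 then
    PySem.List.slice (L.map (fun t => t.2.1)) (some ((pvJ L).getD k 0)) (some ((pvJ L).getD (k+1) 0))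
  else
    PySem.List.slice (L.map (fun t => t.2.1)) (some ((pvJ L).getD k 0)) none
def pvUrl (L : List ((String × String) × String × String)) (k : Nat) : String :=
  "https://scryfall.com" ++ PySem.List.pyGetD (L.map (fun t => t.2.2)) ((pvJ L).getD k 0) ""
def pvOut (L : List ((String × String) × String × String)) (k : Nat) :
    String × String × List String × String :=
  (((pvUq L).getD k ("", "")).1, ((pvUq L).getD k ("", "")).2, pvSet L k, pvUrl L k)

lemma pv_foldl_pair (F : Int → List String) (G : Int → String) (l : List Int)
    (a : List (List String)) (b : List String) :
    l.foldl (fun acc i => (acc.1 ++ [F i], acc.2 ++ [G i])) (a, b) = (a ++ l.map F, b ++ l.map G) := by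
  rw [PySem.List.foldl_prod_mk (f := fun acc i => acc ++ [F i]) (g := fun acc i => acc ++ [G i]),
    PySem.List.foldl_append_singleton_eq_map, PySem.List.foldl_append_singleton_eq_map]

lemma aPipeline_eq_map (L : List ((String × String) × String × String)) :
    aPipeline L = (List.range (pvUq L).length).map (pvOut L) := by
  unfold aPipeline
  rw [PySem.List.foldl_append_singleton_eq_map, List.nil_append]
  rw [pv_foldl_pair]
  simp only [PySem.List.foldl_append_singleton_eq_map, List.nil_append, PySem.List.len_eq,
    List.length_map, PySem.List.pyRange_zero_natCast, List.map_map]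
  apply List.map_congr_left
  intro k hk
  simp only [List.mem_range] at hk
  simp only [pvOut, pvSet, pvUrl, pvJ, pvIdx, pvUq, List.length_map]
  simp only [Function.comp_apply, ← Nat.cast_add_one, PySem.List.pyGetD_natCast,
    PySem.List.getD_map_range _ _ _ _ hk]

lemma pv_foldl_add_absorb {α : Type} [BEq α] [LawfulBEq α] (c : α) :
    ∀ (xs : List α) (s : List α), c ∈ s → (∀ x ∈ xs, x = c) → xs.foldl PySem.Set.add s = s := by
  intro xs
  induction xs with
  | nil => intro s _ _; rfl
  | cons x xs ih =>
    intro s hc hall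
    have hx : x = c := hall x (by simp)
    rw [List.foldl_cons, hx, PySem.Set.add_of_mem hc]
    exact ih s hc (fun y hy => hall y (by simp [hy]))

lemma pv_foldl_add_cons {α : Type} [BEq α] [LawfulBEq α] (c : α) :
    ∀ (rs : List α) (s : List α), c ∉ rs →
      rs.foldl PySem.Set.add (c :: s) = c :: rs.foldl PySem.Set.add s := by
  intro rs
  induction rs with
  | nil => intro s _; rfl
  | cons r rs ih =>
    intro s hc
    have hrc : r ≠ c := fun h => hc (by simp [h])
    have hmem : r ∈ (c :: s) ↔ r ∈ s := by simp [hrc]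
    have hadd : PySem.Set.add (c :: s) r = c :: PySem.Set.add s r := by
      by_cases hr : r ∈ s
      · rw [PySem.Set.add_of_mem (hmem.mpr hr), PySem.Set.add_of_mem hr]
      · rw [PySem.Set.add_of_not_mem (fun h => hr (hmem.mp h)), PySem.Set.add_of_not_mem hr]
        simp
    rw [List.foldl_cons, hadd, List.foldl_cons]
    exact ih _ (fun h => hc (by simp [h]))

lemma pv_dedup_group {α : Type} [BEq α] [LawfulBEq α] (c : α) (xs rs : List α)
    (hxs : ∀ x ∈ xs, x = c) (hrs : c ∉ rs) :
    PySem.List.dedup (c :: (xs ++ rs)) = c :: PySem.List.dedup rs := by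
  simp only [PySem.List.dedup_eq_ofList, PySem.Set.ofList_eq_foldl]
  rw [List.foldl_cons, List.foldl_append]
  have h1 : PySem.Set.add [] c = [c] := by
    rw [PySem.Set.add_of_not_mem (by simp)]; rfl
  rw [h1, pv_foldl_add_absorb c xs [c] (by simp) hxs]
  exact pv_foldl_add_cons c rs [] hrs

lemma pv_index?_append_of_not_mem {α : Type} [BEq α] [LawfulBEq α] (pre suf : List α) (x : α)
    (h : x ∉ pre) :
    PySem.List.index? (pre ++ suf) x = (PySem.List.index? suf x).map (· + pre.length) := by
  induction pre with
  | nil =>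
    simp only [List.nil_append, List.length_nil]
    cases hh : PySem.List.index? suf x <;> rfl
  | cons a pre ih =>
    have hax : a ≠ x := fun hh => h (by simp [hh])
    rw [List.cons_append, PySem.List.index?_cons_of_ne _ hax,
      ih (fun hh => h (by simp [hh]))]
    cases PySem.List.index? suf x
    · rfl
    · simp
      omega

lemma pv_key_fst_le {a b : (String × String) × String × String} (h : pvKey a ≤ pvKey b) :
    toLex a.1 ≤ toLex b.1 := by
  rcases Prod.Lex.le_iff.mp h with h' | ⟨h', _⟩
  · exact le_of_lt h'
  · exact le_of_eq h'

lemma pv_altGroupF_irrel : ∀ (f1 f2 : Nat) (L : List ((String × String) × String × String)),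
    L.length ≤ f1 → L.length ≤ f2 → altGroupF f1 L = altGroupF f2 L := by
  intro f1
  induction f1 with
  | zero =>
    intro f2 L h1 _
    have : L = [] := List.eq_nil_of_length_eq_zero (Nat.le_zero.mp h1)
    subst this; cases f2 <;> rfl
  | succ f1 ih =>
    intro f2 L h1 h2
    cases L with
    | nil => cases f2 <;> rfl
    | cons t rest =>
      cases f2 with
      | zero => simp at h2
      | succ f2 =>
        rw [altGroupF, altGroupF]
        have hd : (rest.dropWhile (fun r => r.1 == t.1)).length ≤ rest.length :=
          List.length_dropWhile_le _ rest
        simp only [List.length_cons] at h1 h2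
        rw [ih f2 _ (by omega) (by omega)]

lemma pv_altGroup_cons (t : (String × String) × String × String)
    (rest : List ((String × String) × String × String)) :
    altGroup (t :: rest) =
      (t.1.1, t.1.2,
       t.2.1 :: (rest.takeWhile (fun r => r.1 == t.1)).map (fun r => r.2.1),
       "https://scryfall.com" ++ t.2.2) :: altGroup (rest.dropWhile (fun r => r.1 == t.1)) := by
  rw [altGroup, List.length_cons, altGroupF, altGroup]
  have hd : (rest.dropWhile (fun r => r.1 == t.1)).length ≤ rest.length :=
    List.length_dropWhile_le _ rest
  rw [pv_altGroupF_irrel rest.length _ _ hd le_rfl]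

lemma pv_uq_group (t : (String × String) × String × String)
    (g' R : List ((String × String) × String × String))
    (hg : ∀ r ∈ g', r.1 = t.1) (hR : ∀ r ∈ R, r.1 ≠ t.1) :
    pvUq (t :: (g' ++ R)) = t.1 :: pvUq R := by
  have h1 : (t :: (g' ++ R)).map (fun r => r.1)
      = t.1 :: ((g'.map (fun r => r.1)) ++ R.map (fun r => r.1)) := by simp
  unfold pvUq
  rw [h1, pv_dedup_group]
  · intro x hx; obtain ⟨r, hr, rfl⟩ := List.mem_map.mp hx; exact hg r hr
  · intro hx; obtain ⟨r, hr, h⟩ := List.mem_map.mp hx; exact hR r hr h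

lemma pv_idx_group (t : (String × String) × String × String)
    (g' R : List ((String × String) × String × String))
    (hg : ∀ r ∈ g', r.1 = t.1) (hR : ∀ r ∈ R, r.1 ≠ t.1) :
    ∀ x ∈ pvUq R, pvIdx (t :: (g' ++ R)) x = pvIdx R x + (g'.length + 1) := by
  intro x hx
  have hxR : x ∈ R.map (fun r => r.1) := by
    simpa [pvUq, PySem.List.mem_dedup] using hx
  have hxne : x ≠ t.1 := by
    obtain ⟨r, hr, rfl⟩ := List.mem_map.mp hxR; exact hR r hr
  have hpre : x ∉ (t.1 :: g'.map (fun r => r.1)) := by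
    intro hmem
    rcases List.mem_cons.mp hmem with h | h
    · exact hxne h
    · obtain ⟨r, hr, h'⟩ := List.mem_map.mp h
      exact hxne (by rw [← h']; exact hg r hr)
  have hsplit : (t :: (g' ++ R)).map (fun r => r.1)
      = (t.1 :: g'.map (fun r => r.1)) ++ R.map (fun r => r.1) := by simp
  obtain ⟨j, hj⟩ := Option.isSome_iff_exists.mp
    ((PySem.List.index?_isSome_iff (R.map (fun r => r.1)) x).mpr hxR)
  unfold pvIdx
  rw [hsplit, pv_index?_append_of_not_mem _ _ _ hpre, hj]
  simp

lemma pv_J_group (t : (String × String) × String × String)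
    (g' R : List ((String × String) × String × String))
    (hg : ∀ r ∈ g', r.1 = t.1) (hR : ∀ r ∈ R, r.1 ≠ t.1) :
    pvJ (t :: (g' ++ R)) = (0 : Int) :: (pvJ R).map (· + ((g'.length + 1 : Nat) : Int)) := by
  unfold pvJ
  rw [pv_uq_group t g' R hg hR, List.map_cons]
  congr 1
  · unfold pvIdx
    rw [show (t :: (g' ++ R)).map (fun r => r.1) = t.1 :: ((g' ++ R).map (fun r => r.1)) by simp,
      PySem.List.index?_cons_self]
    rfl
  · rw [List.map_map]
    apply List.map_congr_left
    intro x hx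
    simp only [Function.comp_apply]
    rw [pv_idx_group t g' R hg hR x hx]
    push_cast
    ring

lemma pv_JR_nat (R : List ((String × String) × String × String)) (k : Nat)
    (hk : k < (pvUq R).length) :
    (pvJ R).getD k 0 = ((pvIdx R ((pvUq R)[k]) : Nat) : Int) := by
  unfold pvJ
  rw [List.getD_eq_getElem _ _ (by simpa using hk), List.getElem_map]

lemma pv_J_len (R : List ((String × String) × String × String)) :
    (pvJ R).length = (pvUq R).length := by
  unfold pvJ; simp

lemma pv_JL_len (t : (String × String) × String × String)
    (g' R : List ((String × String) × String × String))
    (hg : ∀ r ∈ g', r.1 = t.1) (hR : ∀ r ∈ R, r.1 ≠ t.1) :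
    (pvJ (t :: (g' ++ R))).length = (pvUq R).length + 1 := by
  rw [pv_J_group t g' R hg hR]
  simp [pv_J_len]

lemma pv_JL_zero (t : (String × String) × String × String)
    (g' R : List ((String × String) × String × String))
    (hg : ∀ r ∈ g', r.1 = t.1) (hR : ∀ r ∈ R, r.1 ≠ t.1) :
    (pvJ (t :: (g' ++ R))).getD 0 0 = 0 := by
  rw [pv_J_group t g' R hg hR]; rfl

lemma pv_JL_succ (t : (String × String) × String × String)
    (g' R : List ((String × String) × String × String))
    (hg : ∀ r ∈ g', r.1 = t.1) (hR : ∀ r ∈ R, r.1 ≠ t.1) (k : Nat)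
    (hk : k < (pvUq R).length) :
    (pvJ (t :: (g' ++ R))).getD (k + 1) 0 = (pvJ R).getD k 0 + ((g'.length + 1 : Nat) : Int) := by
  rw [pv_J_group t g' R hg hR, List.getD_cons_succ,
    List.getD_eq_getElem _ _ (by simpa [pv_J_len] using hk), List.getElem_map,
    List.getD_eq_getElem _ _ (by simpa [pv_J_len] using hk)]

lemma pv_out_zero (t : (String × String) × String × String)
    (g' R : List ((String × String) × String × String))
    (hg : ∀ r ∈ g', r.1 = t.1) (hR : ∀ r ∈ R, r.1 ≠ t.1) :
    pvOut (t :: (g' ++ R)) 0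
      = (t.1.1, t.1.2, t.2.1 :: g'.map (fun r => r.2.1), "https://scryfall.com" ++ t.2.2) := by
  have hsets : (t :: (g' ++ R)).map (fun r => r.2.1)
      = (t.2.1 :: g'.map (fun r => r.2.1)) ++ R.map (fun r => r.2.1) := by simp
  unfold pvOut pvSet pvUrl
  rw [pv_uq_group t g' R hg hR, pv_JL_zero t g' R hg hR, pv_JL_len t g' R hg hR]
  simp only [List.getD_cons_zero, Prod.mk.injEq]
  refine ⟨trivial, trivial, ?_, ?_⟩
  · -- the set slice
    cases R with
    | nil =>
      have hlen : (pvUq ([] : List ((String × String) × String × String))).length = 0 := rfl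
      rw [hlen, if_neg (by norm_num)]
      rw [PySem.List.slice_zero_start, PySem.List.slice_none_none]
      simp
    | cons r R' =>
      have huqR : pvUq (r :: R') = r.1 :: PySem.Set.discard (pvUq R') r.1 := by
        unfold pvUq
        rw [List.map_cons, PySem.List.dedup_eq_ofList, PySem.Set.ofList_cons]
        rfl
      have hpos : 0 < (pvUq (r :: R')).length := by rw [huqR]; simp
      rw [if_pos (by push_cast; omega)]
      have hJ1 : (pvJ (t :: (g' ++ r :: R'))).getD (0 + 1) 0 = ((g'.length + 1 : Nat) : Int) := by
        rw [pv_JL_succ t g' (r :: R') hg hR 0 hpos]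
        have : (pvJ (r :: R')).getD 0 0 = 0 := by
          unfold pvJ
          rw [huqR, List.map_cons, List.getD_cons_zero]
          unfold pvIdx
          rw [List.map_cons, PySem.List.index?_cons_self]
          rfl
        rw [this, zero_add]
      rw [hJ1, PySem.List.slice_zero_start, PySem.List.slice_to_natCast]
      rw [hsets]
      exact List.take_left' (by simp)
  · -- the URL
    rw [show (t :: (g' ++ R)).map (fun r => r.2.2)
        = t.2.2 :: (g' ++ R).map (fun r => r.2.2) by simp,
      PySem.List.pyGetD_zero_cons]

lemma pv_out_succ (t : (String × String) × String × String)
    (g' R : List ((String × String) × String × String))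
    (hg : ∀ r ∈ g', r.1 = t.1) (hR : ∀ r ∈ R, r.1 ≠ t.1) (k : Nat)
    (hk : k < (pvUq R).length) :
    pvOut (t :: (g' ++ R)) (k + 1) = pvOut R k := by
  have hsets : (t :: (g' ++ R)).map (fun r => r.2.1)
      = (t.2.1 :: g'.map (fun r => r.2.1)) ++ R.map (fun r => r.2.1) := by simp
  have hurls : (t :: (g' ++ R)).map (fun r => r.2.2)
      = (t.2.2 :: g'.map (fun r => r.2.2)) ++ R.map (fun r => r.2.2) := by simp
  have hPs : (t.2.1 :: g'.map (fun r => r.2.1)).length = g'.length + 1 := by simp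
  have hPu : (t.2.2 :: g'.map (fun r => r.2.2)).length = g'.length + 1 := by simp
  obtain ⟨a', ha'⟩ : ∃ a : Nat, (pvJ R).getD k 0 = (a : Int) :=
    ⟨_, pv_JR_nat R k hk⟩
  unfold pvOut pvSet pvUrl
  rw [pv_uq_group t g' R hg hR, List.getD_cons_succ,
    pv_JL_len t g' R hg hR, pv_J_len R,
    pv_JL_succ t g' R hg hR k hk, ha']
  simp only [Prod.mk.injEq]
  refine ⟨trivial, trivial, ?_, ?_⟩
  · by_cases hc : (k : Int) = ((pvUq R).length : Int) - 1
    · rw [if_neg (by push_cast; omega), if_neg (by omega)]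
      rw [← Nat.cast_add, PySem.List.slice_from_natCast, PySem.List.slice_from_natCast, hsets]
      rw [show a' + (g'.length + 1) = (t.2.1 :: g'.map (fun r => r.2.1)).length + a' by
        rw [hPs]; omega]
      exact List.drop_length_add_append a'
    · have hk1 : k + 1 < (pvUq R).length := by omega
      obtain ⟨b', hb'⟩ : ∃ b : Nat, (pvJ R).getD (k + 1) 0 = (b : Int) :=
        ⟨_, pv_JR_nat R (k + 1) hk1⟩
      rw [if_pos (by push_cast; omega), if_pos (by omega)]
      rw [pv_JL_succ t g' R hg hR (k + 1) hk1, hb']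
      rw [← Nat.cast_add, ← Nat.cast_add, PySem.List.slice_natCast, PySem.List.slice_natCast, hsets]
      rw [show a' + (g'.length + 1) = (t.2.1 :: g'.map (fun r => r.2.1)).length + a' by
        rw [hPs]; omega]
      rw [List.drop_length_add_append a']
      congr 1
      rw [hPs]
      omega
  · rw [← Nat.cast_add, PySem.List.pyGetD_natCast, PySem.List.pyGetD_natCast, hurls]
    rw [List.getD_append_right _ _ _ _ (by rw [hPu]; omega)]
    rw [hPu, Nat.add_sub_cancel]

lemma pv_pipeline_cons_group (t : (String × String) × String × String)
    (g' R : List ((String × String) × String × String))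
    (hg : ∀ r ∈ g', r.1 = t.1) (hR : ∀ r ∈ R, r.1 ≠ t.1) :
    aPipeline (t :: (g' ++ R))
      = (t.1.1, t.1.2, t.2.1 :: g'.map (fun r => r.2.1), "https://scryfall.com" ++ t.2.2) ::
        aPipeline R := by
  rw [aPipeline_eq_map, aPipeline_eq_map, pv_uq_group t g' R hg hR, List.length_cons,
    List.range_succ_eq_map, List.map_cons, List.map_map]
  congr 1
  · exact pv_out_zero t g' R hg hR
  · apply List.map_congr_left
    intro k hk
    simp only [List.mem_range] at hk
    exact pv_out_succ t g' R hg hR k hk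

lemma pv_main_aux : ∀ (n : Nat) (L : List ((String × String) × String × String)),
    L.length ≤ n → L.Pairwise (fun a b => pvKey a ≤ pvKey b) → aPipeline L = altGroup L := by
  intro n
  induction n with
  | zero =>
    intro L hL _
    have : L = [] := List.eq_nil_of_length_eq_zero (Nat.le_zero.mp hL)
    subst this
    rw [aPipeline_eq_map]
    rfl
  | succ n ih =>
    intro L hL hP
    cases L with
    | nil =>
      rw [aPipeline_eq_map]
      rfl
    | cons t rest =>
      have hpc := List.pairwise_cons.mp hP
      have hhead : ∀ r ∈ rest, pvKey t ≤ pvKey r := hpc.1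
      have hPrest : rest.Pairwise (fun a b => pvKey a ≤ pvKey b) := hpc.2
      have hsplit : rest.takeWhile (fun r => r.1 == t.1) ++ rest.dropWhile (fun r => r.1 == t.1)
          = rest := List.takeWhile_append_dropWhile
      have hg : ∀ r ∈ rest.takeWhile (fun r => r.1 == t.1), r.1 = t.1 := by
        intro r hr
        have hb := List.mem_takeWhile_imp hr
        simpa using hb
      have hPR : (rest.dropWhile (fun r => r.1 == t.1)).Pairwise
          (fun a b => pvKey a ≤ pvKey b) :=
        hPrest.sublist (List.dropWhile_sublist _)
      have hRne : ∀ r ∈ rest.dropWhile (fun r => r.1 == t.1), r.1 ≠ t.1 := by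
        cases hdw : rest.dropWhile (fun r => r.1 == t.1) with
        | nil => intro r hr; simp at hr
        | cons r0 R' =>
          have hr0 : (r0.1 == t.1) = false := by
            have := List.head_dropWhile_not (fun r => r.1 == t.1) (l := rest) (by simp [hdw])
            simpa [hdw] using this
          have hr0ne : r0.1 ≠ t.1 := by simpa using hr0
          intro r hr h1
          rcases List.mem_cons.mp hr with rfl | hr'
          · exact hr0ne h1
          · -- r comes after r0; keys are monotone, so r0's card would equal t's card
            have h10 : pvKey t ≤ pvKey r0 := by
              apply hhead
              have : r0 ∈ rest.dropWhile (fun r => r.1 == t.1) := by simp [hdw]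
              exact List.Sublist.mem this (List.dropWhile_sublist _)
            have h0r : pvKey r0 ≤ pvKey r := by
              have := List.pairwise_cons.mp (hdw ▸ hPR)
              exact this.1 r hr'
            have hle1 : toLex t.1 ≤ toLex r0.1 := pv_key_fst_le h10
            have hle2 : toLex r0.1 ≤ toLex r.1 := pv_key_fst_le h0r
            have : toLex r0.1 = toLex t.1 := le_antisymm (h1 ▸ hle2) hle1
            exact hr0ne (by simpa using this)
      have hlen : (rest.dropWhile (fun r => r.1 == t.1)).length ≤ n := by
        have := List.length_dropWhile_le (fun r => r.1 == t.1) rest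
        simp only [List.length_cons] at hL
        omega
      rw [pv_altGroup_cons]
      conv_lhs => rw [← hsplit]
      rw [pv_pipeline_cons_group t _ _ hg hRne, ih _ hlen hPR]

lemma pv_main (L : List ((String × String) × String × String))
    (h : L.Pairwise (fun a b => pvKey a ≤ pvKey b)) : aPipeline L = altGroup L :=
  pv_main_aux L.length L le_rfl h

-- ===== VERDICT (by name: the statement is the Claim_ definition above) =====
theorem process_card_data_spec : Claim_equal_process_card_data := by
  intro cl sl ul _ _
  unfold Spec_process_card_data process_card_data process_card_data_alt
  exact pv_main _ (PySem.List.sorted_pairwise _ _)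

theorem process_card_data_raises : Claim_raises_process_card_data := by
  unfold Claim_raises_process_card_data
  constructor
  · intro cl sl ul _ hr hp
    rcases hr with h | h | h
    · exact hp.1 h
    · exact hp.2.1 h
    · exact hp.2.2 h
  · exact ⟨by decide, by decide, by decide⟩

-- self-check: at the raise witness (all-empty input) B's port indeed returns the stated []
theorem pv_raise_witness_ok :
    process_card_data_alt pvRaiseWitness_process_card_data.1 pvRaiseWitness_process_card_data.2.1
      pvRaiseWitness_process_card_data.2.2 = pvRaiseWitnessOut_process_card_data :=
  process_card_data_raises.2.2.2
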